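-- pv_equiv track=rewrite | github.com/nishio/atcoder | abc182/f.py | solve
-- ===== SOURCE A (Python) =====
-- def solve(N, X, AS):
--     digits = []
--     mods = []
--     x = X
--     for i in range(1, N):
--         m = AS[i] // AS[i - 1]
--         mods.insert(0, m)
--         q, r = divmod(x, m)
--         digits.insert(0, r)
--         x = q
--     digits.insert(0, x)
--     mods.insert(0, 0)
--
--     ret = 1
--     for i in range(N):
--         if digits[i] + 1 != mods[i]:
--             # can increment
--             # debug(i, digits[i], mods[i], msg=":i, digits[i], mods[i]")
--             for j in range(i + 1, N):
--                 if digits[j] != 0: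
--                     ret += 1
--     # debug(digits, msg=":digits")
--     # debug(mods, msg=":mods")
--     return ret
-- ===== SOURCE B (Python) =====
-- def solve(N, X, AS):
--     # One pass, O(N): process digits least-significant first, keeping a running
--     # count of nonzero digits seen so far (they are the "suffix" of A's list).
--     x = X
--     ret = 1
--     cnt = 0
--     for i in range(1, N):
--         m = AS[i] // AS[i - 1]
--         x, r = divmod(x, m)
--         if r + 1 != m:
--             ret += cnt
--         if r != 0:
--             cnt += 1
--     if x + 1 != 0:
--         ret += cnt
--     return ret
-- ===== Notes on version B (the rewrite author's own statement) =====
-- stated objective: faster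
-- what changed: B replaces A's two-phase algorithm (build the digit/radix lists with insert(0), then for each incrementable position rescan the whole suffix for nonzero digits) by a single pass that processes digits least-significant first, maintaining a running count of nonzero digits already seen, so no lists and no inner scan remain.
import Mathlib
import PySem

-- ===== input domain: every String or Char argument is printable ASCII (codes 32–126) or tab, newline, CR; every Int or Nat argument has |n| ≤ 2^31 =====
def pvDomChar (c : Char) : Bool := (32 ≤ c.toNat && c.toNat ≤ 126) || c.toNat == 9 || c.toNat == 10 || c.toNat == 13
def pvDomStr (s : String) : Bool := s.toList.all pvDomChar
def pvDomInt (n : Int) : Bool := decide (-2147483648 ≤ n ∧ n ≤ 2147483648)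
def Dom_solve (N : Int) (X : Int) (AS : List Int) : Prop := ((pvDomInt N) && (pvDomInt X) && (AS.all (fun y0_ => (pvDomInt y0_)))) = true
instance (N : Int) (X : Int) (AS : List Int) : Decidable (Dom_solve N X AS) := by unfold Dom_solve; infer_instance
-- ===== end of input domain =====

-- B: one O(N) pass (least-significant digit first, running nonzero count) instead of A's O(N^2) list-building + suffix rescans.


-- ===== PORT A =====
-- Literal transliteration of A: phase 1 builds digits/mods by insert(0) (cons) over range(1, N);
-- phase 2: for each i in range(N), if digits[i]+1 != mods[i], scan range(i+1, N) counting nonzero digits.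
def solve (N : Int) (X : Int) (AS : List Int) : Int :=
  let st := (PySem.List.pyRange 1 N 1).foldl
    (fun (s : List Int × List Int × Int) i =>
      let m := PySem.Int.floordiv (PySem.List.pyGetD AS i 0) (PySem.List.pyGetD AS (i - 1) 0)
      let q := PySem.Int.floordiv s.2.2 m
      let r := PySem.Int.mod s.2.2 m
      (r :: s.1, m :: s.2.1, q))
    ([], [], X)
  let digits : List Int := st.2.2 :: st.1
  let mods : List Int := 0 :: st.2.1
  (PySem.List.pyRange 0 N 1).foldl
    (fun ret i =>
      if PySem.List.pyGetD digits i 0 + 1 ≠ PySem.List.pyGetD mods i 0 then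
        (PySem.List.pyRange (i + 1) N 1).foldl
          (fun r j => if PySem.List.pyGetD digits j 0 ≠ 0 then r + 1 else r) ret
      else ret)
    1

-- ===== PORT B =====
-- Literal transliteration of B (Source B): single fold over range(1, N) with state (x, ret, cnt).
def solve_alt (N : Int) (X : Int) (AS : List Int) : Int :=
  let st := (PySem.List.pyRange 1 N 1).foldl
    (fun (s : Int × Int × Int) i =>
      let m := PySem.Int.floordiv (PySem.List.pyGetD AS i 0) (PySem.List.pyGetD AS (i - 1) 0)
      let r := PySem.Int.mod s.1 m
      let x := PySem.Int.floordiv s.1 m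
      let ret := if r + 1 ≠ m then s.2.1 + s.2.2 else s.2.1
      let cnt := if r ≠ 0 then s.2.2 + 1 else s.2.2
      (x, ret, cnt))
    (X, 1, 0)
  if st.1 + 1 ≠ 0 then st.2.1 + st.2.2 else st.2.1

-- ===== PRECONDITION & SPEC =====
-- Pre_ excludes exactly the inputs where Python A raises: for N ≥ 2 it needs AS[1..N-1]
-- (IndexError otherwise) and each radix AS[i-1] ≠ 0 and AS[i] // AS[i-1] ≠ 0 (ZeroDivisionError).
def Pre_solve (N : Int) (X : Int) (AS : List Int) : Prop :=
  N ≤ 1 ∨ (N ≤ (AS.length : Int) ∧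
    ∀ k ∈ List.range (N.toNat - 1),
      AS.getD k 0 ≠ 0 ∧ PySem.Int.floordiv (AS.getD (k + 1) 0) (AS.getD k 0) ≠ 0)
instance (N : Int) (X : Int) (AS : List Int) : Decidable (Pre_solve N X AS) := by
  unfold Pre_solve; infer_instance
def pvWitness_solve : Int × Int × List Int := (3, 11, [1, 2, 6])

def Spec_solve (N : Int) (X : Int) (AS : List Int) (out : Int) : Prop := out = solve_alt N X AS
instance (N : Int) (X : Int) (AS : List Int) (out : Int) : Decidable (Spec_solve N X AS out) := by unfold Spec_solve; infer_instance

-- ===== CLAIM (what is proved, stated in full; the proofs are below) =====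
def Claim_equal_solve : Prop := ∀ (N : Int) (X : Int) (AS : List Int), Dom_solve N X AS → Pre_solve N X AS → Spec_solve N X AS (solve N X AS)

-- ===== LEMMAS AND PROOFS =====

-- forward division chain, returned in A's digits order (most significant first, final x separate)
def chain (AS : List Int) (a b x : Int) : List (Int × Int) × Int :=
  if _h : a < b then
    let m := PySem.Int.floordiv (PySem.List.pyGetD AS a 0) (PySem.List.pyGetD AS (a - 1) 0)
    let r := PySem.Int.mod x m
    let p := chain AS (a + 1) b (PySem.Int.floordiv x m)
    (p.1 ++ [(r, m)], p.2)
  else ([], x)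
  termination_by (b - a).toNat
  decreasing_by simp_wf; omega

-- nonzero-digit count, incrementable-position count, and A's weighted sum on a pairs list
def nzc (L : List (Int × Int)) : Int := (L.countP (fun p => p.1 ≠ 0) : Int)
def ccc (L : List (Int × Int)) : Int := (L.countP (fun p => p.1 + 1 ≠ p.2) : Int)
def bsum : List (Int × Int) → Int
  | [] => 0
  | p :: L => (if p.1 + 1 ≠ p.2 then nzc L else 0) + bsum L
lemma nzc_nil : nzc [] = 0 := rfl
lemma ccc_nil : ccc [] = 0 := rfl
lemma bsum_nil : bsum [] = 0 := rfl

lemma nzc_append_singleton (L : List (Int × Int)) (p : Int × Int) :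
    nzc (L ++ [p]) = nzc L + (if p.1 ≠ 0 then 1 else 0) := by
  simp [nzc, List.countP_append, List.countP_cons]

lemma ccc_append_singleton (L : List (Int × Int)) (p : Int × Int) :
    ccc (L ++ [p]) = ccc L + (if p.1 + 1 ≠ p.2 then 1 else 0) := by
  simp [ccc, List.countP_append, List.countP_cons]

lemma bsum_append_singleton (L : List (Int × Int)) (p : Int × Int) :
    bsum (L ++ [p]) = bsum L + (if p.1 ≠ 0 then ccc L else 0) := by
  induction L with
  | nil => simp [bsum, nzc_nil, ccc_nil]
  | cons q L ih =>
      simp only [List.cons_append, bsum, ih, nzc_append_singleton, ccc, List.countP_cons]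
      split_ifs <;> simp_all [ccc] <;> ring

lemma chain_not_lt (AS : List Int) (a b x : Int) (h : ¬ a < b) :
    chain AS a b x = ([], x) := by rw [chain]; simp [h]

lemma chain_lt (AS : List Int) (a b x : Int) (h : a < b) :
    chain AS a b x =
      ((chain AS (a + 1) b (PySem.Int.floordiv x (PySem.Int.floordiv (PySem.List.pyGetD AS a 0) (PySem.List.pyGetD AS (a - 1) 0)))).1
        ++ [(PySem.Int.mod x (PySem.Int.floordiv (PySem.List.pyGetD AS a 0) (PySem.List.pyGetD AS (a - 1) 0)),
             PySem.Int.floordiv (PySem.List.pyGetD AS a 0) (PySem.List.pyGetD AS (a - 1) 0))],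
       (chain AS (a + 1) b (PySem.Int.floordiv x (PySem.Int.floordiv (PySem.List.pyGetD AS a 0) (PySem.List.pyGetD AS (a - 1) 0)))).2) := by
  rw [chain]; simp [h]

lemma chain_length (AS : List Int) (b : Int) : ∀ (n : Nat) (a x : Int), (b - a).toNat = n →
    (chain AS a b x).1.length = n := by
  intro n
  induction n with
  | zero => intro a x h; rw [chain_not_lt AS a b x (by omega)]; rfl
  | succ n ih =>
      intro a x h
      rw [chain_lt AS a b x (by omega)]
      simp [ih (a + 1) _ (by omega)]

lemma chainA (AS : List Int) (b : Int) : ∀ (n : Nat) (a : Int), (b - a).toNat = n → ∀ (x : Int) (ds ms : List Int),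
    (PySem.List.pyRange a b 1).foldl
      (fun (s : List Int × List Int × Int) i =>
        let m := PySem.Int.floordiv (PySem.List.pyGetD AS i 0) (PySem.List.pyGetD AS (i - 1) 0)
        let q := PySem.Int.floordiv s.2.2 m
        let r := PySem.Int.mod s.2.2 m
        (r :: s.1, m :: s.2.1, q))
      (ds, ms, x)
    = ((chain AS a b x).1.map Prod.fst ++ ds,
       (chain AS a b x).1.map Prod.snd ++ ms,
       (chain AS a b x).2) := by
  intro n
  induction n with
  | zero =>
      intro a h x ds ms
      rw [PySem.List.pyRange_one_eq_nil (by omega), chain_not_lt AS a b x (by omega)]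
      simp
  | succ n ih =>
      intro a h x ds ms
      rw [PySem.List.pyRange_one_cons (by omega), chain_lt AS a b x (by omega)]
      simp only [List.foldl_cons]
      rw [ih (a + 1) (by omega)]
      simp

lemma chainB (AS : List Int) (b : Int) : ∀ (n : Nat) (a : Int), (b - a).toNat = n → ∀ (x ret cnt : Int),
    (PySem.List.pyRange a b 1).foldl
      (fun (s : Int × Int × Int) i =>
        let m := PySem.Int.floordiv (PySem.List.pyGetD AS i 0) (PySem.List.pyGetD AS (i - 1) 0)
        let r := PySem.Int.mod s.1 m
        let x := PySem.Int.floordiv s.1 m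
        let ret := if r + 1 ≠ m then s.2.1 + s.2.2 else s.2.1
        let cnt := if r ≠ 0 then s.2.2 + 1 else s.2.2
        (x, ret, cnt))
      (x, ret, cnt)
    = ((chain AS a b x).2,
       ret + bsum (chain AS a b x).1 + cnt * ccc (chain AS a b x).1,
       cnt + nzc (chain AS a b x).1) := by
  intro n
  induction n with
  | zero =>
      intro a h x ret cnt
      rw [PySem.List.pyRange_one_eq_nil (by omega), chain_not_lt AS a b x (by omega)]
      simp [bsum_nil, nzc_nil, ccc_nil]
  | succ n ih =>
      intro a h x ret cnt
      rw [PySem.List.pyRange_one_cons (by omega), chain_lt AS a b x (by omega)]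
      simp only [List.foldl_cons]
      rw [ih (a + 1) (by omega)]
      simp only [bsum_append_singleton, nzc_append_singleton, ccc_append_singleton]
      refine Prod.ext rfl (Prod.ext ?_ ?_) <;> simp only [] <;> split_ifs <;> ring
lemma outerA (P : List (Int × Int)) : ∀ (n : Nat) (a : Int), 0 ≤ a → ((P.length : Int) - a).toNat = n → ∀ (ret : Int),
    (PySem.List.pyRange a (P.length : Int) 1).foldl
      (fun ret i =>
        if PySem.List.pyGetD (P.map Prod.fst) i 0 + 1 ≠ PySem.List.pyGetD (P.map Prod.snd) i 0 then
          (PySem.List.pyRange (i + 1) (P.length : Int) 1).foldl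
            (fun r j => if PySem.List.pyGetD (P.map Prod.fst) j 0 ≠ 0 then r + 1 else r) ret
        else ret)
      ret
    = ret + bsum (P.drop a.toNat) := by
  intro n
  induction n with
  | zero =>
      intro a ha h ret
      rw [PySem.List.pyRange_one_eq_nil (by omega)]
      have : P.drop a.toNat = [] := List.drop_eq_nil_of_le (by omega)
      simp [this, bsum_nil]
  | succ n ih =>
      intro a ha h ret
      have hlt : a.toNat < P.length := by omega
      rw [PySem.List.pyRange_one_cons (by omega)]
      simp only [List.foldl_cons]
      have hgetf : PySem.List.pyGetD (P.map Prod.fst) a 0 = P[a.toNat].1 := by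
        rw [PySem.List.pyGetD_eq_getElem (P.map Prod.fst) 0 ha (by simpa using by omega)]
        simp
      have hgets : PySem.List.pyGetD (P.map Prod.snd) a 0 = P[a.toNat].2 := by
        rw [PySem.List.pyGetD_eq_getElem (P.map Prod.snd) 0 ha (by simpa using by omega)]
        simp
      have hdrop : P.drop a.toNat = P[a.toNat] :: P.drop (a.toNat + 1) :=
        List.drop_eq_getElem_cons hlt
      have hinner : ∀ r0 : Int,
          (PySem.List.pyRange (a + 1) (P.length : Int) 1).foldl
            (fun r j => if PySem.List.pyGetD (P.map Prod.fst) j 0 ≠ 0 then r + 1 else r) r0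
          = r0 + nzc (P.drop (a.toNat + 1)) := by
        intro r0
        have hb : ((P.map Prod.fst).length : Int) = (P.length : Int) := by simp
        rw [← hb, PySem.List.foldl_pyRange_pyGetD' (P.map Prod.fst) 0
              (fun r d => if d ≠ 0 then r + 1 else r) r0 (show (0:Int) ≤ a + 1 by omega),
            PySem.List.foldl_ite_add_one]
        have h1 : (a + 1).toNat = a.toNat + 1 := by omega
        rw [h1, ← List.map_drop, List.countP_map]
        simp [nzc]
        rfl
      rw [hgetf, hgets]
      have step : (if P[a.toNat].1 + 1 ≠ P[a.toNat].2 then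
            (PySem.List.pyRange (a + 1) (P.length : Int) 1).foldl
              (fun r j => if PySem.List.pyGetD (P.map Prod.fst) j 0 ≠ 0 then r + 1 else r) ret
          else ret)
          = ret + (if P[a.toNat].1 + 1 ≠ P[a.toNat].2 then nzc (P.drop (a.toNat + 1)) else 0) := by
        split_ifs with hc
        · exact hinner ret
        · ring
      rw [step, ih (a + 1) (by omega) (by omega)]
      have h1 : (a + 1).toNat = a.toNat + 1 := by omega
      rw [h1, hdrop, bsum]
      ring
theorem solve_spec : Claim_equal_solve := by
  intro N X AS _ _
  unfold Spec_solve
  by_cases hN : N ≤ 0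
  · simp only [solve, solve_alt]
    rw [PySem.List.pyRange_one_eq_nil (show N ≤ (1:Int) by omega),
        PySem.List.pyRange_one_eq_nil (show N ≤ (0:Int) by omega)]
    simp
  · have hA1 := chainA AS N (N - 1).toNat 1 (by omega) X [] []
    have hB1 := chainB AS N (N - 1).toNat 1 (by omega) X 1 0
    set L := (chain AS 1 N X).1 with hL
    set xf := (chain AS 1 N X).2 with hxf
    have hlen : L.length = (N - 1).toNat := chain_length AS N (N - 1).toNat 1 X rfl
    have hPN : (((((xf, (0:Int))) :: L).length : Int)) = N := by
      simp [hlen]; omega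
    simp only [solve, solve_alt]
    rw [hA1, hB1]
    simp only [List.append_nil]
    have e1 : xf :: L.map Prod.fst = ((xf, (0:Int)) :: L).map Prod.fst := by simp
    have e2 : (0:Int) :: L.map Prod.snd = ((xf, (0:Int)) :: L).map Prod.snd := by simp
    rw [e1, e2, ← hPN]
    rw [outerA ((xf, (0:Int)) :: L) ((xf, (0:Int)) :: L).length 0 (by omega) (by omega) 1]
    simp only [Int.toNat_zero, List.drop_zero, bsum]
    split_ifs <;> ring
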